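-- pv_equiv track=rewrite | github.com/LucaDal/AdventOfCode | day9/second.py | get_place_holder
-- ===== SOURCE A (Python) =====
-- def check_all_zeros(steps):
--     for step in steps:
--         if step != 0:
--             return True
--     return False
--
-- def get_place_holder(series):
--     history = []
--     history.append(series)
--     while check_all_zeros(series):
--         new_series = []
--         for index in range(len(series)-1):
--             new_series.append(series[index+1] - series[index])
--         series = new_series
--         history.append(series)
--     return history
-- ===== SOURCE B (Python) =====
-- def get_place_holder(series):
--     if all(x == 0 for x in series):
--         return [series]
--     diffs = [b - a for a, b in zip(series, series[1:])]
--     return [series] + get_place_holder(diffs)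
-- ===== Notes on version B (the rewrite author's own statement) =====
-- stated objective: simpler
-- what changed: Replaced the iterative while-loop with an accumulator list and an index-based inner loop by direct structural recursion on the shrinking sequence, with diffs built by zipping the series with its tail.
import Mathlib
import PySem

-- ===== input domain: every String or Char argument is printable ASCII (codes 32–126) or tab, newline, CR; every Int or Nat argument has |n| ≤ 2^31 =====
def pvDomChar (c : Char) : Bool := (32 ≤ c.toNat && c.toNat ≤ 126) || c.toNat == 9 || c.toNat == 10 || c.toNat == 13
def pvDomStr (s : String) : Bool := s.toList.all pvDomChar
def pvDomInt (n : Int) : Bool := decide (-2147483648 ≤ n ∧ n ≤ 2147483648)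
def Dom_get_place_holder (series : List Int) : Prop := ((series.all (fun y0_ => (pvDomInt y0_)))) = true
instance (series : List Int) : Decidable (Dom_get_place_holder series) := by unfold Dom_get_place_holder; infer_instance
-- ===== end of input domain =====

-- B replaces A's while-loop with an accumulator by structural recursion on the shrinking
-- sequence (diffs built by zipping the series with its tail); objective: simpler.

-- ===== PORT A =====
def check_all_zeros : List Int → Bool
  | [] => false
  | step :: rest => if step ≠ 0 then true else check_all_zeros rest

-- inner for-loop: indices 0..len-2 are always in range, so pyGetD's default 0 is never used
def pyNewSeries (series : List Int) : List Int :=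
  (PySem.List.pyRange 0 ((series.length : Int) - 1) 1).foldl
    (fun acc index =>
      acc ++ [PySem.List.pyGetD series (index + 1) 0 - PySem.List.pyGetD series index 0]) []

theorem pyNewSeries_eq_map (s : List Int) : pyNewSeries s =
    (PySem.List.pyRange 0 ((s.length : Int) - 1) 1).map
      (fun index => PySem.List.pyGetD s (index + 1) 0 - PySem.List.pyGetD s index 0) := by
  unfold pyNewSeries
  rw [PySem.List.foldl_append_singleton_eq_map]
  simp

theorem pyNewSeries_length (s : List Int) : (pyNewSeries s).length = s.length - 1 := by
  rw [pyNewSeries_eq_map]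
  simp [PySem.List.length_pyRange_one]

theorem check_all_zeros_ne_nil {s : List Int} (h : check_all_zeros s = true) : s ≠ [] := by
  intro hs; subst hs; simp [check_all_zeros] at h

def get_place_holder_go (series : List Int) (history : List (List Int)) : List (List Int) :=
  if _h : check_all_zeros series = true then
    let new_series := pyNewSeries series
    get_place_holder_go new_series (history ++ [new_series])
  else history
termination_by series.length
decreasing_by
  have h1 := pyNewSeries_length series
  have h2 := check_all_zeros_ne_nil _h
  have : series.length ≠ 0 := by simpa using h2
  omega

def get_place_holder (series : List Int) : List (List Int) :=
  get_place_holder_go series ([] ++ [series])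

-- ===== PORT B =====
def get_place_holder_alt (series : List Int) : List (List Int) :=
  if _h : series.all (fun x => x == 0) then [series]
  else series :: get_place_holder_alt (List.zipWith (fun a b => b - a) series series.tail)
termination_by series.length
decreasing_by
  have : series ≠ [] := by
    intro hs; subst hs; simp at _h
  have : series.length ≠ 0 := by simpa using this
  simp [List.length_zipWith]
  omega

-- ===== PRECONDITION & SPEC =====
def Spec_get_place_holder (series : List Int) (out : List (List Int)) : Prop := out = get_place_holder_alt series
instance (series : List Int) (out : List (List Int)) : Decidable (Spec_get_place_holder series out) := by unfold Spec_get_place_holder; infer_instance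

-- ===== CLAIM (what is proved, stated in full; the proofs are below) =====
def Claim_equal_get_place_holder : Prop := ∀ (series : List Int), Dom_get_place_holder series → Spec_get_place_holder series (get_place_holder series)

-- ===== LEMMAS AND PROOFS =====

theorem check_all_zeros_eq_not_all (s : List Int) :
    check_all_zeros s = !(s.all (fun x => x == 0)) := by
  induction s with
  | nil => simp [check_all_zeros]
  | cons a t ih =>
    by_cases ha : a = 0 <;> simp [check_all_zeros, ha, ih]

theorem pyNewSeries_eq_zipWith (s : List Int) :
    pyNewSeries s = List.zipWith (fun a b => b - a) s s.tail := by
  rw [pyNewSeries_eq_map]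
  apply List.ext_getElem
  · simp [PySem.List.length_pyRange_one, List.length_zipWith]
  · intro k hk1 hk2
    have hlen : k < s.length - 1 := by
      simpa [List.length_zipWith] using hk2
    have hks : k < s.length := by omega
    have hk1s : k + 1 < s.length := by omega
    rw [List.getElem_map, PySem.List.getElem_pyRange_one]
    have e1 : (0 : Int) + (k : Int) + 1 = ((k + 1 : Nat) : Int) := by push_cast; ring
    have e0 : (0 : Int) + (k : Int) = ((k : Nat) : Int) := by ring
    rw [e1, e0, PySem.List.pyGetD_natCast, PySem.List.pyGetD_natCast, List.getElem_zipWith]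
    rw [List.getD_eq_getElem s 0 hk1s, List.getD_eq_getElem s 0 hks, List.getElem_tail]

theorem go_eq_alt : ∀ (n : Nat) (s : List Int), s.length ≤ n →
    ∀ (h : List (List Int)), get_place_holder_go s (h ++ [s]) = h ++ get_place_holder_alt s := by
  intro n
  induction n with
  | zero =>
    intro s hs h
    have : s = [] := List.eq_nil_of_length_eq_zero (by omega)
    subst this
    rw [get_place_holder_go, get_place_holder_alt]
    simp [check_all_zeros]
  | succ n ih =>
    intro s hs h
    rw [get_place_holder_go, get_place_holder_alt]
    by_cases hz : check_all_zeros s = true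
    · have hall : ¬ (s.all (fun x => x == 0) = true) := by
        rw [check_all_zeros_eq_not_all] at hz; simpa using hz
      rw [dif_pos hz, dif_neg hall]
      show get_place_holder_go (pyNewSeries s) (h ++ [s] ++ [pyNewSeries s]) =
        h ++ s :: get_place_holder_alt (List.zipWith (fun a b => b - a) s s.tail)
      have hne := check_all_zeros_ne_nil hz
      have hlen : (pyNewSeries s).length ≤ n := by
        have := pyNewSeries_length s
        have : s.length ≠ 0 := by simpa using hne
        omega
      have hrec := ih (pyNewSeries s) hlen (h ++ [s])
      rw [List.append_assoc] at hrec ⊢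
      rw [hrec, pyNewSeries_eq_zipWith]
      simp
    · have hall : s.all (fun x => x == 0) = true := by
        rw [check_all_zeros_eq_not_all] at hz; simpa using hz
      rw [dif_neg hz, dif_pos hall]

-- ===== VERDICT (by name: the statement is the Claim_ definition above) =====
theorem get_place_holder_spec : Claim_equal_get_place_holder := by
  intro series _
  unfold Spec_get_place_holder get_place_holder
  simpa using go_eq_alt series.length series le_rfl []
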